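-- pv_equiv track=rewrite | github.com/kwonis/Sosanggomin | sosangomin-ai/services/eda_service.py | _calculate_overall_date_range
-- ===== SOURCE A (Python) =====
-- def _calculate_overall_date_range(date_ranges):
--     """여러 데이터 소스의 날짜 범위를 병합하여 전체 범위 계산"""
--     if not date_ranges:
--         return None
--
--     start_months = []
--     end_months = []
--
--     for date_range in date_ranges:
--         if "start_month" in date_range:
--             start_months.append(date_range["start_month"])
--         if "end_month" in date_range:
--             end_months.append(date_range["end_month"])
--
--     if not start_months or not end_months:
--         return None
--
--     earliest_start = min(start_months)
--     latest_end = max(end_months)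
--
--     return {
--         "start_month": earliest_start,
--         "end_month": latest_end
--     }
-- ===== SOURCE B (Python) =====
-- def _calculate_overall_date_range(date_ranges):
--     """Merge date ranges: single pass keeping scalar running min/max instead of
--     building intermediate lists and rescanning them with min()/max()."""
--     earliest_start = None
--     latest_end = None
--     for date_range in date_ranges:
--         if "start_month" in date_range:
--             v = date_range["start_month"]
--             if earliest_start is None or v < earliest_start:
--                 earliest_start = v
--         if "end_month" in date_range:
--             v = date_range["end_month"]
--             if latest_end is None or v > latest_end:
--                 latest_end = v
--     if earliest_start is None or latest_end is None:
--         return None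
--     return {
--         "start_month": earliest_start,
--         "end_month": latest_end
--     }
-- ===== Notes on version B (the rewrite author's own statement) =====
-- stated objective: simpler
-- what changed: Replaces the two intermediate lists plus min()/max() rescans with one pass over date_ranges maintaining two scalar running accumulators (earliest_start, latest_end), and drops the separate empty-input check.
import Mathlib
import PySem

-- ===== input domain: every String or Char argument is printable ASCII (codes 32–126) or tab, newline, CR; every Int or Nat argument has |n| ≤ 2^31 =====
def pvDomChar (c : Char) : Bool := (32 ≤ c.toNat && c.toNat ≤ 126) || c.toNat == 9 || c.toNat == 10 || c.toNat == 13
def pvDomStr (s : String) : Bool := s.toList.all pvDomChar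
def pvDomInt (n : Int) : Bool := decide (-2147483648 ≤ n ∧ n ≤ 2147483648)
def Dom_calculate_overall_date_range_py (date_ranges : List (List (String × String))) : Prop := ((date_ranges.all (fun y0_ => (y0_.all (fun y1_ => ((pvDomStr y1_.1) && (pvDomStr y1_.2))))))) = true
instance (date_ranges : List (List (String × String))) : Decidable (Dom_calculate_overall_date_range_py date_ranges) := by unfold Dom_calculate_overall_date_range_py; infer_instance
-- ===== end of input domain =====

-- B replaces A's two intermediate lists + min()/max() rescans by one pass with two scalar
-- running accumulators (objective: simpler, same asymptotic cost).

-- ===== PORT A =====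
-- 'key in d' followed by 'd[key]' on a dict ≡ first-match association-list lookup:
-- List.lookup returns 'some v' exactly when the key is present, with the first value.
def calculate_overall_date_range_py (date_ranges : List (List (String × String))) : Option (List (String × String)) :=
  if date_ranges = [] then none
  else
    -- the for-loop building start_months and end_months by appending
    let p : List String × List String :=
      date_ranges.foldl (fun acc dr =>
        let acc1 : List String × List String :=
          match List.lookup "start_month" dr with
          | some v => (acc.1 ++ [v], acc.2)
          | none => acc
        match List.lookup "end_month" dr with
        | some v => (acc1.1, acc1.2 ++ [v])
        | none => acc1) ([], [])
    if p.1 = [] ∨ p.2 = [] then none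
    else
      match PySem.List.min? p.1 (fun x => x), PySem.List.max? p.2 (fun x => x) with
      | some earliest_start, some latest_end =>
          some [("start_month", earliest_start), ("end_month", latest_end)]
      | _, _ => none  -- unreachable: both lists nonempty here (min/max never raise)

-- ===== PORT B =====
-- single pass, scalar accumulators (Option = Python None sentinel)
def calculate_overall_date_range_py_alt (date_ranges : List (List (String × String))) : Option (List (String × String)) :=
  let p : Option String × Option String :=
    date_ranges.foldl (fun acc dr =>
      let acc1 : Option String × Option String :=
        match List.lookup "start_month" dr with
        | some v =>
            (match acc.1 with
             | none => (some v, acc.2)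
             | some e => if v < e then (some v, acc.2) else acc)
        | none => acc
      match List.lookup "end_month" dr with
      | some v =>
          (match acc1.2 with
           | none => (acc1.1, some v)
           | some l => if l < v then (acc1.1, some v) else acc1)
      | none => acc1) (none, none)
  -- if earliest_start is None or latest_end is None: return None
  match p.1 with
  | none => none
  | some earliest_start =>
      match p.2 with
      | none => none
      | some latest_end =>
          some [("start_month", earliest_start), ("end_month", latest_end)]

-- ===== PRECONDITION & SPEC =====
def Spec_calculate_overall_date_range_py (date_ranges : List (List (String × String))) (out : Option (List (String × String))) : Prop := out = calculate_overall_date_range_py_alt date_ranges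
instance (date_ranges : List (List (String × String))) (out : Option (List (String × String))) : Decidable (Spec_calculate_overall_date_range_py date_ranges out) := by unfold Spec_calculate_overall_date_range_py; infer_instance

-- ===== CLAIM (what is proved, stated in full; the proofs are below) =====
def Claim_equal_calculate_overall_date_range_py : Prop := ∀ (date_ranges : List (List (String × String))), Dom_calculate_overall_date_range_py date_ranges → Spec_calculate_overall_date_range_py date_ranges (calculate_overall_date_range_py date_ranges)

-- ===== LEMMAS AND PROOFS =====

def pvS (drs : List (List (String × String))) : List String :=
  drs.filterMap (fun dr => List.lookup "start_month" dr)

def pvE (drs : List (List (String × String))) : List String :=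
  drs.filterMap (fun dr => List.lookup "end_month" dr)

-- A's loop collects exactly the two filterMap lists
theorem foldA_eq (drs : List (List (String × String))) (ss es : List String) :
    drs.foldl (fun (acc : List String × List String) dr =>
        let acc1 : List String × List String :=
          match List.lookup "start_month" dr with
          | some v => (acc.1 ++ [v], acc.2)
          | none => acc
        match List.lookup "end_month" dr with
        | some v => (acc1.1, acc1.2 ++ [v])
        | none => acc1) (ss, es)
      = (ss ++ pvS drs, es ++ pvE drs) := by
  induction drs generalizing ss es with
  | nil => simp [pvS, pvE]
  | cons d t ih =>
      simp only [List.foldl_cons, pvS, pvE, List.filterMap_cons]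
      cases hs : List.lookup "start_month" d <;> cases he : List.lookup "end_month" d <;>
        simp [ih, pvS, pvE]

-- the scalar accumulator step, as option-valued min/max
def pvOMin (o : Option String) (v : String) : Option String :=
  match o with
  | none => some v
  | some e => if v < e then some v else some e

def pvOMax (o : Option String) (v : String) : Option String :=
  match o with
  | none => some v
  | some l => if l < v then some v else some l

theorem stepB_eq (dr : List (String × String)) (e l : Option String) :
    (let acc1 : Option String × Option String :=
        match List.lookup "start_month" dr with
        | some v =>
            (match e with
             | none => (some v, l)
             | some e' => if v < e' then (some v, l) else (e, l))
        | none => (e, l)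
      match List.lookup "end_month" dr with
      | some v =>
          (match acc1.2 with
           | none => (acc1.1, some v)
           | some l' => if l' < v then (acc1.1, some v) else acc1)
      | none => acc1)
    = ((match List.lookup "start_month" dr with
        | some v => pvOMin e v
        | none => e),
       (match List.lookup "end_month" dr with
        | some v => pvOMax l v
        | none => l)) := by
  cases List.lookup "start_month" dr <;> cases List.lookup "end_month" dr <;>
    cases e <;> cases l <;> (try rfl) <;> simp only [pvOMin, pvOMax] <;> (try rfl) <;>
      split_ifs <;> first | rfl | (dsimp only; split_ifs <;> rfl) | simp_all

theorem foldB_eq (drs : List (List (String × String))) (e l : Option String) :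
    drs.foldl (fun (acc : Option String × Option String) dr =>
        let acc1 : Option String × Option String :=
          match List.lookup "start_month" dr with
          | some v =>
              (match acc.1 with
               | none => (some v, acc.2)
               | some e => if v < e then (some v, acc.2) else acc)
          | none => acc
        match List.lookup "end_month" dr with
        | some v =>
            (match acc1.2 with
             | none => (acc1.1, some v)
             | some l => if l < v then (acc1.1, some v) else acc1)
        | none => acc1) (e, l)
      = ((pvS drs).foldl pvOMin e, (pvE drs).foldl pvOMax l) := by
  induction drs generalizing e l with
  | nil => simp [pvS, pvE]
  | cons d t ih =>
      simp only [List.foldl_cons, pvS, pvE, List.filterMap_cons]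
      rw [stepB_eq d e l]
      cases hs : List.lookup "start_month" d <;> cases he : List.lookup "end_month" d <;>
        simp only [ih, pvS, pvE, List.foldl_cons]

theorem pvOMin_some (a v : String) : pvOMin (some a) v = some (min a v) := by
  simp only [pvOMin, min_def]
  by_cases h : a ≤ v
  · rw [if_neg (not_lt_of_ge h), if_pos h]
  · rw [if_pos (lt_of_not_ge h), if_neg h]

theorem pvOMax_some (a v : String) : pvOMax (some a) v = some (max a v) := by
  simp only [pvOMax, max_def]
  by_cases h : a < v
  · rw [if_pos h, if_pos (le_of_lt h)]
  · by_cases h2 : a ≤ v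
    · rw [if_neg h, if_pos h2, le_antisymm h2 (not_lt.mp h)]
    · rw [if_neg h, if_neg h2]

theorem foldl_pvOMin_some (t : List String) (a : String) :
    t.foldl pvOMin (some a) = some (t.foldl min a) := by
  induction t generalizing a with
  | nil => rfl
  | cons x xs ih => simp [pvOMin_some, ih]

theorem foldl_pvOMax_some (t : List String) (a : String) :
    t.foldl pvOMax (some a) = some (t.foldl max a) := by
  induction t generalizing a with
  | nil => rfl
  | cons x xs ih => simp [pvOMax_some, ih]

-- B's running accumulator from 'none' computes Python's min()/max()
theorem foldl_pvOMin_none (ss : List String) :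
    ss.foldl pvOMin none = PySem.List.min? ss (fun x => x) := by
  cases ss with
  | nil => rfl
  | cons x t =>
      rw [PySem.List.min?_id_cons]
      simpa [pvOMin] using foldl_pvOMin_some t x

theorem foldl_pvOMax_none (es : List String) :
    es.foldl pvOMax none = PySem.List.max? es (fun x => x) := by
  cases es with
  | nil => rfl
  | cons x t =>
      rw [PySem.List.max?_id_cons]
      simpa [pvOMax] using foldl_pvOMax_some t x

theorem min?_nil_str : PySem.List.min? ([] : List String) (fun x => x) = none := rfl
theorem max?_nil_str : PySem.List.max? ([] : List String) (fun x => x) = none := rfl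

-- ===== VERDICT (by name: the statement is the Claim_ definition above) =====
theorem calculate_overall_date_range_py_spec : Claim_equal_calculate_overall_date_range_py := by
  intro drs _
  unfold Spec_calculate_overall_date_range_py
  unfold calculate_overall_date_range_py calculate_overall_date_range_py_alt
  rw [foldA_eq, foldB_eq, foldl_pvOMin_none, foldl_pvOMax_none]
  simp only [List.nil_append]
  rcases eq_or_ne drs [] with rfl | hne
  · simp [pvS, pvE, min?_nil_str, max?_nil_str]
  · simp only [hne, if_false]
    rcases hS : pvS drs with _ | ⟨x, t⟩ <;> rcases hE : pvE drs with _ | ⟨y, u⟩ <;>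
      simp [min?_nil_str, max?_nil_str, PySem.List.min?_id_cons, PySem.List.max?_id_cons]
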